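-- pv_equiv track=rewrite | github.com/open-e/jdss-api-tools | jdss-api-tools.py | nice_print
-- ===== SOURCE A (Python) =====
-- def nice_print(a_list,html=None):
--     nice_txt = ''
--     for i, item in enumerate(a_list):
--         if (i + 1) % 3:
--             nice_txt += f"{item:30}\t"
--         else:
--             nice_txt += f"{item}\n"
--     return f"<pre>{nice_txt}</pre>" if html else nice_txt
-- ===== SOURCE B (Python) =====
-- def nice_print(a_list, html=None):
--     rows = []
--     for start in range(0, len(a_list), 3):
--         g = a_list[start:start + 3]
--         if len(g) == 3:
--             rows.append(f"{g[0]:30}\t{g[1]:30}\t{g[2]}\n")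
--         else:
--             rows.append("".join(f"{x:30}\t" for x in g))
--     nice_txt = "".join(rows)
--     return f"<pre>{nice_txt}</pre>" if html else nice_txt
-- ===== Notes on version B (the rewrite author's own statement) =====
-- stated objective: alternative
-- what changed: Replaces the per-element (i+1)%3 modulo counter with a row-chunked traversal: strides of 3 slice out each row, full rows are emitted as one formatted string and the trailing partial row as padded+tab cells, all joined at the end.
import Mathlib
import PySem

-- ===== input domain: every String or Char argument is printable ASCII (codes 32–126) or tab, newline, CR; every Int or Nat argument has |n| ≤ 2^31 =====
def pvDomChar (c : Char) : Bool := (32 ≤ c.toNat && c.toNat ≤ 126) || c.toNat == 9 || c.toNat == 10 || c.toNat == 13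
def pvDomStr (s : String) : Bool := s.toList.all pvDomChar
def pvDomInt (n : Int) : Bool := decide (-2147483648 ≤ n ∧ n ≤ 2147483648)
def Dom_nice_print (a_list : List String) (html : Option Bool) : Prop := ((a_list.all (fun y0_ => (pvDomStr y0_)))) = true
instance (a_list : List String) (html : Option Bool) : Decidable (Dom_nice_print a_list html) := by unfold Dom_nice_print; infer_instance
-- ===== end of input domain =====

-- B replaces A's per-element (i+1)%3 counter with a row-chunked (3-at-a-time) traversal; alternative decomposition, same cost.
-- Strings are handled as List Char (Lean's String primitives are kernel-opaque).

-- f"{s:30}" : left-justify to width 30 with spaces (unchanged if already ≥ 30 chars)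
def pvPad30 (s : String) : List Char := s.toList ++ List.replicate (30 - s.toList.length) ' '

-- ===== PORT A =====
-- A's loop body: on index i, pad+tab if (i+1)%3 is nonzero (Python int truthiness), else item+newline
def pvStepA (acc : List Char) (p : Int × String) : List Char :=
  if PySem.Int.mod (p.1 + 1) 3 ≠ 0 then acc ++ pvPad30 p.2 ++ ['\t']
  else acc ++ p.2.toList ++ ['\n']

def nice_print (a_list : List String) (html : Option Bool) : String :=
  let nice_txt := (PySem.List.enumerate a_list 0).foldl pvStepA []
  if html = some true then String.ofList ("<pre>".toList ++ nice_txt ++ "</pre>".toList)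
  else String.ofList nice_txt

-- ===== PORT B =====
-- one trailing cell f"{x:30}\t"
def pvCellB (s : String) : List Char := pvPad30 s ++ ['\t']

-- chunked rows: a full group of three becomes one row string; the trailing group of
-- one or two becomes its cells (Source B's join over the partial slice)
def pvRowsB : List String → List Char
  | [] => []
  | [a] => pvCellB a
  | [a, b] => pvCellB a ++ pvCellB b
  | a :: b :: c :: rest =>
      (pvPad30 a ++ ['\t'] ++ pvPad30 b ++ ['\t'] ++ c.toList ++ ['\n']) ++ pvRowsB rest

def nice_print_alt (a_list : List String) (html : Option Bool) : String :=
  let nice_txt := pvRowsB a_list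
  if html = some true then String.ofList ("<pre>".toList ++ nice_txt ++ "</pre>".toList)
  else String.ofList nice_txt

-- ===== PRECONDITION & SPEC =====
def Spec_nice_print (a_list : List String) (html : Option Bool) (out : String) : Prop := out = nice_print_alt a_list html
instance (a_list : List String) (html : Option Bool) (out : String) : Decidable (Spec_nice_print a_list html out) := by unfold Spec_nice_print; infer_instance

-- ===== CLAIM (what is proved, stated in full; the proofs are below) =====
def Claim_equal_nice_print : Prop := ∀ (a_list : List String) (html : Option Bool), Dom_nice_print a_list html → Spec_nice_print a_list html (nice_print a_list html)

-- ===== LEMMAS AND PROOFS =====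

lemma pvLoop_eq (l : List String) : ∀ (s : Int), s % 3 = 0 → ∀ (acc : List Char),
    (PySem.List.enumerate l s).foldl pvStepA acc = acc ++ pvRowsB l := by
  induction l using pvRowsB.induct with
  | case1 => intro s _ acc; simp [PySem.List.enumerate, pvRowsB]
  | case2 a =>
      intro s hs acc
      have h1 : ¬ (3:Int) ∣ (s + 1) := by omega
      simp [PySem.List.enumerate_cons, PySem.List.enumerate_nil, pvStepA, h1, pvRowsB, pvCellB]
  | case3 a b =>
      intro s hs acc
      have h1 : ¬ (3:Int) ∣ (s + 1) := by omega
      have h2 : ¬ (3:Int) ∣ (s + 1 + 1) := by omega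
      simp [PySem.List.enumerate_cons, PySem.List.enumerate_nil, pvStepA, h1, h2, pvRowsB, pvCellB]
  | case4 a b c rest ih =>
      intro s hs acc
      have h1 : ¬ (3:Int) ∣ (s + 1) := by omega
      have h2 : ¬ (3:Int) ∣ (s + 1 + 1) := by omega
      have h3 : (3:Int) ∣ (s + 1 + 1 + 1) := by omega
      simp only [PySem.List.enumerate_cons, List.foldl_cons]
      rw [ih (s + 1 + 1 + 1) (by omega)]
      simp [pvStepA, h1, h2, h3, pvRowsB]

-- ===== VERDICT (by name: the statement is the Claim_ definition above) =====
theorem nice_print_spec : Claim_equal_nice_print := by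
  intro a_list html _
  unfold Spec_nice_print nice_print nice_print_alt
  rw [pvLoop_eq a_list 0 (by decide) []]
  simp
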